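-- pv_equiv track=rewrite | github.com/rosrossito/EdgeDetection | edge_detector/line_detection/polyfit.py | is_rect_divided
-- ===== SOURCE A (Python) =====
-- THRESHOLD_LINE = 4
--
-- def get_neighbours(y, x):
--     return [(y - 1, x - 1), (y - 1, x), (y - 1, x + 1), (y, x + 1), (y + 1, x + 1), (y + 1, x), (y + 1, x - 1),
--             (y, x - 1)]
--
-- def check_lines_appropraite(lines):
--     lines_to_remove = []
--     for key in lines:
--         if len(lines[key]) < THRESHOLD_LINE:
--             lines_to_remove.append(key)
--     for key in lines_to_remove:
--         lines.pop(key)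
--
-- def is_rect_divided(rect):
--     lines = {}
--     counter = 1
--
--     while rect:
--         line = []
--         current_y = rect[0][0]
--         current_x = rect[0][1]
--         rect.remove((current_y, current_x))
--         line.append((current_y, current_x))
--         check_neighbours(current_y, current_x, line, rect)
--         lines[counter] = line
--         counter = counter + 1
--     check_lines_appropraite(lines)
--     return len(lines) > 1, lines
--
-- def check_neighbours(current_y, current_x, rect, y_x_arr):
--     neighbours = get_neighbours(current_y, current_x)
--     for neighbour in neighbours:
--         if neighbour in y_x_arr:
--             y_x_arr.remove(neighbour)
--             rect.append(neighbour)
--             check_neighbours(neighbour[0], neighbour[1], rect, y_x_arr)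
-- ===== SOURCE B (Python) =====
-- THRESHOLD_LINE = 4
--
-- OFFSETS = [(-1, -1), (-1, 0), (-1, 1), (0, 1), (1, 1), (1, 0), (1, -1), (0, -1)]
--
-- def is_rect_divided(rect):
--     components = []
--     while rect:
--         y0, x0 = rect.pop(0)
--         line = [(y0, x0)]
--         # iterative DFS; each frame is (y, x, index of next offset to try)
--         stack = [(y0, x0, 0)]
--         while stack:
--             y, x, i = stack[-1]
--             if i == 8:
--                 stack.pop()
--                 continue
--             stack[-1] = (y, x, i + 1)
--             dy, dx = OFFSETS[i]
--             nb = (y + dy, x + dx)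
--             if nb in rect:
--                 rect.remove(nb)
--                 line.append(nb)
--                 stack.append((nb[0], nb[1], 0))
--         components.append(line)
--     lines = {k: v for k, v in enumerate(components, 1) if len(v) >= THRESHOLD_LINE}
--     return len(lines) > 1, lines
-- ===== Notes on version B (the rewrite author's own statement) =====
-- stated objective: alternative
-- what changed: check_neighbours's recursion is replaced by an iterative DFS over an explicit stack of (point, next-offset-index) frames reading a constant offset table (claiming a point only at the moment of descent, so the visiting order is preserved), the outer loop collects the bare component lists, and the numbering plus the two-pass key-removal filter of A become one enumerate-and-filter pass at the end.
import Mathlib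
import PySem

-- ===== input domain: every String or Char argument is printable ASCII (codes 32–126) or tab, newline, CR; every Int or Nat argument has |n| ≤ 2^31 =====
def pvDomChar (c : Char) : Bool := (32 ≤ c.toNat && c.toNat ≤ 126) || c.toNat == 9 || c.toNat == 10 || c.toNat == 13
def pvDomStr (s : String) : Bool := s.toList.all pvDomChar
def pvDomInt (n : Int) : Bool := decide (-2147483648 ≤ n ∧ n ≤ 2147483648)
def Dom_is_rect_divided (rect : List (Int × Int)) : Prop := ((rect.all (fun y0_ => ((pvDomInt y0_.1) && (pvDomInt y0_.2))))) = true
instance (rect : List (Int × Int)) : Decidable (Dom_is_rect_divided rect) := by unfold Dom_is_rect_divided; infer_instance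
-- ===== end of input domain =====

-- B replaces check_neighbours's recursion by an iterative DFS over an explicit stack of
-- (point, next-offset-index) frames reading an offset table (same visiting order), collects
-- the components first and numbers+filters them in one enumerate pass at the end;
-- equivalence is about the RETURN value (both A and B empty the caller's rect list in place).

-- ===== PORT A =====
def getNeighbours (y x : Int) : List (Int × Int) :=
  [(y - 1, x - 1), (y - 1, x), (y - 1, x + 1), (y, x + 1), (y + 1, x + 1), (y + 1, x),
   (y + 1, x - 1), (y, x - 1)]

-- check_neighbours(current_y, current_x, rect=line, y_x_arr=rest), unrolled over the neighbour
-- list. `fuel` is a pure totality device: the wrapper passes 8 + 10*rest.length, which is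
-- proved sufficient, so the fuel-exhausted arm is never reached.
def cnA (fuel : Nat) (ns line rest : List (Int × Int)) : List (Int × Int) × List (Int × Int) :=
  match fuel, ns with
  | _, [] => (line, rest)
  | 0, _ :: _ => (line, rest)
  | f + 1, nb :: t =>
    if nb ∈ rest then
      let r1 := cnA f (getNeighbours nb.1 nb.2) (line ++ [nb]) (rest.erase nb)
      cnA f t r1.1 r1.2
    else cnA f t line rest

-- the `while rect:` loop of is_rect_divided (fuel = rect.length, one unit per iteration)
def outerA (fuel : Nat) (rect : List (Int × Int)) (lines : List (Int × List (Int × Int)))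
    (counter : Int) : List (Int × List (Int × Int)) :=
  match fuel, rect with
  | _, [] => lines
  | 0, _ :: _ => lines
  | f + 1, (y, x) :: tl =>
    let rest := ((y, x) :: tl).erase (y, x)
    let r := cnA (8 + 10 * rest.length) (getNeighbours y x) [(y, x)] rest
    outerA f r.2 (lines ++ [(counter, r.1)]) (counter + 1)

-- check_lines_appropraite: collect the short keys, then pop them one by one
-- (dict.pop k = remove the first pair with that key from the association list)
def checkLinesA (lines : List (Int × List (Int × Int))) : List (Int × List (Int × Int)) :=
  let toRemove := lines.foldl (fun acc kv => if kv.2.length < 4 then acc ++ [kv.1] else acc) ([] : List Int)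
  toRemove.foldl (fun l k => l.eraseP (fun kv => kv.1 == k)) lines

def is_rect_divided (rect : List (Int × Int)) : Bool × (List (Int × List (Int × Int))) :=
  let lines := checkLinesA (outerA rect.length rect [] 1)
  (decide (1 < lines.length), lines)

-- ===== PORT B =====
def offsetsB : List (Int × Int) :=
  [(-1, -1), (-1, 0), (-1, 1), (0, 1), (1, 1), (1, 0), (1, -1), (0, -1)]

-- the inner `while stack:` loop of B; a frame (y, x, i) means: point (y, x), offsets 0..i-1
-- already tried. `fuel` is a pure totality device (one unit per loop iteration; the wrapper's
-- 9 * (tl.length + 1) is proved sufficient).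
def dfsB (fuel : Nat) (stack : List (Int × Int × Nat)) (line rest : List (Int × Int)) :
    List (Int × Int) × List (Int × Int) :=
  match fuel, stack with
  | _, [] => (line, rest)
  | 0, _ :: _ => (line, rest)
  | f + 1, (y, x, i) :: st =>
    if i == 8 then dfsB f st line rest
    else
      let od := offsetsB.getD i (0, 0)
      let nb := (y + od.1, x + od.2)
      if nb ∈ rest then
        dfsB f ((nb.1, nb.2, 0) :: (y, x, i + 1) :: st) (line ++ [nb]) (rest.erase nb)
      else dfsB f ((y, x, i + 1) :: st) line rest

-- the `while rect:` loop of B: collect the component of each successive first point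
def componentsB (fuel : Nat) (rect : List (Int × Int)) : List (List (Int × Int)) :=
  match fuel, rect with
  | _, [] => []
  | 0, _ :: _ => []
  | f + 1, (y, x) :: tl =>
    let p := dfsB (9 * (tl.length + 1)) [(y, x, 0)] [(y, x)] tl
    p.1 :: componentsB f p.2

def is_rect_divided_alt (rect : List (Int × Int)) : Bool × (List (Int × List (Int × Int))) :=
  let lines := (PySem.List.enumerate (componentsB rect.length rect) 1).filter
    (fun kv => 4 ≤ kv.2.length)
  (decide (1 < lines.length), lines)

-- ===== PRECONDITION & SPEC =====
def Spec_is_rect_divided (rect : List (Int × Int)) (out : Bool × (List (Int × List (Int × Int)))) : Prop := out = is_rect_divided_alt rect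
instance (rect : List (Int × Int)) (out : Bool × (List (Int × List (Int × Int)))) : Decidable (Spec_is_rect_divided rect out) := by unfold Spec_is_rect_divided; infer_instance

-- ===== CLAIM (what is proved, stated in full; the proofs are below) =====
def Claim_equal_is_rect_divided : Prop := ∀ (rect : List (Int × Int)), Dom_is_rect_divided rect → Spec_is_rect_divided rect (is_rect_divided rect)

-- ===== LEMMAS AND PROOFS =====

theorem cnA_nil (f : Nat) (line rest : List (Int × Int)) : cnA f [] line rest = (line, rest) := by
  cases f <;> rfl

theorem cnA_cons_mem {nb : Int × Int} {rest : List (Int × Int)} (f : Nat) (t line : List (Int × Int)) (h : nb ∈ rest) :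
    cnA (f + 1) (nb :: t) line rest =
      cnA f t (cnA f (getNeighbours nb.1 nb.2) (line ++ [nb]) (rest.erase nb)).1
              (cnA f (getNeighbours nb.1 nb.2) (line ++ [nb]) (rest.erase nb)).2 := by
  simp [cnA, h]

theorem cnA_cons_not {nb : Int × Int} {rest : List (Int × Int)} (f : Nat) (t line : List (Int × Int)) (h : nb ∉ rest) :
    cnA (f + 1) (nb :: t) line rest = cnA f t line rest := by
  simp [cnA, h]

theorem cnA_len : ∀ (f : Nat) (ns line rest : List (Int × Int)),
    (cnA f ns line rest).2.length ≤ rest.length := by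
  intro f
  induction f with
  | zero => intro ns line rest; cases ns <;> simp [cnA]
  | succ a ih =>
    intro ns line rest
    cases ns with
    | nil => rw [cnA_nil]
    | cons nb t =>
      by_cases h : nb ∈ rest
      · rw [cnA_cons_mem a t line h]
        have h1 := ih t (cnA a (getNeighbours nb.1 nb.2) (line ++ [nb]) (rest.erase nb)).1
          (cnA a (getNeighbours nb.1 nb.2) (line ++ [nb]) (rest.erase nb)).2
        have h2 := ih (getNeighbours nb.1 nb.2) (line ++ [nb]) (rest.erase nb)
        have h3 : (rest.erase nb).length ≤ rest.length := List.Sublist.length_le List.erase_sublist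
        omega
      · rw [cnA_cons_not a t line h]
        exact ih t line rest

-- B-side step lemmas
theorem dfs_nil (f : Nat) (line rest : List (Int × Int)) : dfsB f [] line rest = (line, rest) := by
  cases f <;> rfl

theorem dfs_pop (f : Nat) (y x : Int) (st : List (Int × Int × Nat)) (line rest : List (Int × Int)) :
    dfsB (f + 1) ((y, x, 8) :: st) line rest = dfsB f st line rest := rfl

theorem dfs_step (f : Nat) (y x : Int) (i : Nat) (st : List (Int × Int × Nat))
    (line rest : List (Int × Int)) (h : i ≠ 8) :
    dfsB (f + 1) ((y, x, i) :: st) line rest =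
      (let od := offsetsB.getD i (0, 0)
       let nb := (y + od.1, x + od.2)
       if nb ∈ rest then
         dfsB f ((nb.1, nb.2, 0) :: (y, x, i + 1) :: st) (line ++ [nb]) (rest.erase nb)
       else dfsB f ((y, x, i + 1) :: st) line rest) := by
  simp [dfsB, h]

-- for i < 8, the neighbour read from the offset table is the head of the suffix of
-- get_neighbours that frame (y, x, i) still has to scan
theorem neighbours_drop (y x : Int) (i : Nat) (h : i < 8) :
    (getNeighbours y x).drop i =
      (y + (offsetsB.getD i (0, 0)).1, x + (offsetsB.getD i (0, 0)).2)
        :: (getNeighbours y x).drop (i + 1) := by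
  interval_cases i <;> simp [getNeighbours, offsetsB] <;> omega

def measB (stack : List (Int × Int × Nat)) (rest : List (Int × Int)) : Nat :=
  (stack.map (fun fr => 9 - fr.2.2)).sum + 9 * rest.length

def wfB (stack : List (Int × Int × Nat)) : Prop := ∀ fr ∈ stack, fr.2.2 ≤ 8

theorem dfsB_irrel : ∀ (f1 : Nat) (stack : List (Int × Int × Nat)) (line rest : List (Int × Int)) (f2 : Nat),
    wfB stack → measB stack rest ≤ f1 → measB stack rest ≤ f2 →
    dfsB f1 stack line rest = dfsB f2 stack line rest := by
  intro f1
  induction f1 with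
  | zero =>
    intro stack line rest f2 hw h1 _
    cases stack with
    | nil => rw [dfs_nil, dfs_nil]
    | cons fr st =>
      exfalso
      have := hw fr (List.mem_cons_self ..)
      simp only [measB, List.map_cons, List.sum_cons] at h1
      omega
  | succ a ih =>
    intro stack line rest f2 hw h1 h2
    cases stack with
    | nil => rw [dfs_nil, dfs_nil]
    | cons fr st =>
      obtain ⟨y, x, i⟩ := fr
      have hi : i ≤ 8 := hw (y, x, i) (List.mem_cons_self ..)
      have hwst : wfB st := fun fr hf => hw fr (List.mem_cons_of_mem _ hf)
      simp only [measB, List.map_cons, List.sum_cons] at h1 h2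
      cases f2 with
      | zero => exfalso; omega
      | succ b =>
        by_cases h8 : i = 8
        · subst h8
          rw [dfs_pop, dfs_pop]
          exact ih st line rest b hwst (by simp [measB] at *; omega) (by simp [measB] at *; omega)
        · rw [dfs_step a y x i st line rest h8, dfs_step b y x i st line rest h8]
          simp only
          by_cases hm : (y + (offsetsB.getD i (0, 0)).1, x + (offsetsB.getD i (0, 0)).2) ∈ rest
          · have he := List.length_erase_of_mem hm
            have hp := List.length_pos_of_mem hm
            rw [if_pos hm, if_pos hm]
            refine ih _ _ _ b ?_ ?_ ?_
            · intro fr hf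
              rcases List.mem_cons.mp hf with rfl | hf
              · simp
              rcases List.mem_cons.mp hf with rfl | hf
              · simp; omega
              exact hw fr (List.mem_cons_of_mem _ hf)
            · simp only [measB, List.map_cons, List.sum_cons]; omega
            · simp only [measB, List.map_cons, List.sum_cons]; omega
          · rw [if_neg hm, if_neg hm]
            refine ih _ _ _ b ?_ ?_ ?_
            · intro fr hf
              rcases List.mem_cons.mp hf with rfl | hf
              · simp; omega
              exact hw fr (List.mem_cons_of_mem _ hf)
            · simp only [measB, List.map_cons, List.sum_cons]; omega
            · simp only [measB, List.map_cons, List.sum_cons]; omega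

-- the core simulation: one B frame (y, x, i) behaves like check_neighbours run on the
-- still-unscanned suffix of get_neighbours y x
theorem dfs_frame : ∀ (fB : Nat) (i : Nat) (y x : Int) (st : List (Int × Int × Nat))
    (line rest : List (Int × Int)) (fA fB' : Nat),
    i ≤ 8 → wfB st →
    measB ((y, x, i) :: st) rest ≤ fB →
    (8 - i) + 10 * rest.length ≤ fA →
    measB st (cnA fA ((getNeighbours y x).drop i) line rest).2 ≤ fB' →
    dfsB fB ((y, x, i) :: st) line rest =
      dfsB fB' st (cnA fA ((getNeighbours y x).drop i) line rest).1
                  (cnA fA ((getNeighbours y x).drop i) line rest).2 := by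
  intro fB
  induction fB with
  | zero =>
    intro i y x st line rest fA fB' hi _ h1 _ _
    exfalso
    simp only [measB, List.map_cons, List.sum_cons] at h1
    omega
  | succ f ih =>
    intro i y x st line rest fA fB' hi hwst h1 h2 h3
    simp only [measB, List.map_cons, List.sum_cons] at h1
    by_cases h8 : i = 8
    · subst h8
      have hd : (getNeighbours y x).drop 8 = [] := by simp [getNeighbours]
      rw [hd, cnA_nil] at h3 ⊢
      rw [dfs_pop]
      exact dfsB_irrel f st line rest fB' hwst (by simp only [measB] at *; omega) h3
    · have hlt : i < 8 := by omega
      obtain ⟨fa, rfl⟩ : ∃ fa, fA = fa + 1 := ⟨fA - 1, by omega⟩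
      have hnd := neighbours_drop y x i hlt
      rw [dfs_step f y x i st line rest h8]
      simp only
      rw [hnd] at h3 ⊢
      set nb : Int × Int := (y + (offsetsB.getD i (0, 0)).1, x + (offsetsB.getD i (0, 0)).2) with hnb
      by_cases hm : nb ∈ rest
      · have he := List.length_erase_of_mem hm
        have hp := List.length_pos_of_mem hm
        rw [if_pos hm]
        rw [cnA_cons_mem fa _ line hm] at h3 ⊢
        set r1 := cnA fa (getNeighbours nb.1 nb.2) (line ++ [nb]) (rest.erase nb) with hr1
        have hl1 : r1.2.length ≤ (rest.erase nb).length :=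
          cnA_len fa (getNeighbours nb.1 nb.2) (line ++ [nb]) (rest.erase nb)
        have hd0 : (getNeighbours nb.1 nb.2).drop 0 = getNeighbours nb.1 nb.2 := rfl
        have hstep1 := ih 0 nb.1 nb.2 ((y, x, i + 1) :: st) (line ++ [nb]) (rest.erase nb) fa f
          (by omega)
          (by intro fr hf
              rcases List.mem_cons.mp hf with rfl | hf
              · simp; omega
              exact hwst fr hf)
          (by simp only [measB, List.map_cons, List.sum_cons]; omega)
          (by omega)
          (by simp only [measB, List.map_cons, List.sum_cons, hd0, ← hr1]; omega)
        rw [hd0] at hstep1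
        rw [hstep1]
        exact ih (i + 1) y x st r1.1 r1.2 fa fB' (by omega) hwst
          (by simp only [measB, List.map_cons, List.sum_cons]; omega)
          (by omega) h3
      · rw [if_neg hm]
        rw [cnA_cons_not fa _ line hm] at h3 ⊢
        exact ih (i + 1) y x st line rest fa fB' (by omega) hwst
          (by simp only [measB, List.map_cons, List.sum_cons]; omega)
          (by omega) h3

-- B's whole inner loop equals A's check_neighbours on the full neighbour list
theorem dfs_eq_cnA (y x : Int) (tl : List (Int × Int)) :
    dfsB (9 * (tl.length + 1)) [(y, x, 0)] [(y, x)] tl =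
      cnA (8 + 10 * tl.length) (getNeighbours y x) [(y, x)] tl := by
  have hl := cnA_len (8 + 10 * tl.length) (getNeighbours y x) [(y, x)] tl
  have h := dfs_frame (9 * (tl.length + 1)) 0 y x [] [(y, x)] tl (8 + 10 * tl.length)
    (9 * (cnA (8 + 10 * tl.length) ((getNeighbours y x).drop 0) [(y, x)] tl).2.length)
    (by omega) (by intro fr hf; cases hf)
    (by simp only [measB, List.map_cons, List.sum_cons, List.map_nil, List.sum_nil]; omega)
    (by omega)
    (by simp only [measB, List.map_nil, List.sum_nil]; omega)
  rw [dfs_nil] at h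
  simpa using h

theorem outerA_cons (f : Nat) (y x : Int) (tl : List (Int × Int))
    (lines : List (Int × List (Int × Int))) (counter : Int) :
    outerA (f + 1) ((y, x) :: tl) lines counter =
      outerA f (cnA (8 + 10 * (((y, x) :: tl).erase (y, x)).length) (getNeighbours y x) [(y, x)]
          (((y, x) :: tl).erase (y, x))).2
        (lines ++ [(counter, (cnA (8 + 10 * (((y, x) :: tl).erase (y, x)).length) (getNeighbours y x) [(y, x)]
          (((y, x) :: tl).erase (y, x))).1)]) (counter + 1) := rfl

-- A's outer loop = the components list of B, numbered from `counter`
theorem outerA_enum : ∀ (f : Nat) (rect : List (Int × Int))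
    (lines : List (Int × List (Int × Int))) (counter : Int),
    outerA f rect lines counter = lines ++ PySem.List.enumerate (componentsB f rect) counter := by
  intro f
  induction f with
  | zero =>
    intro rect lines counter
    cases rect <;> simp [outerA, componentsB, PySem.List.enumerate_nil]
  | succ f ih =>
    intro rect lines counter
    cases rect with
    | nil => simp [outerA, componentsB, PySem.List.enumerate_nil]
    | cons hd tl =>
      obtain ⟨y, x⟩ := hd
      rw [outerA_cons, List.erase_cons_head, ih]
      show _ = lines ++ PySem.List.enumerate (componentsB (f + 1) ((y, x) :: tl)) counter
      simp only [componentsB, dfs_eq_cnA, PySem.List.enumerate_cons, List.append_assoc,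
        List.singleton_append]

theorem outerA_keys : ∀ (f : Nat) (rect : List (Int × Int)),
    ∀ (lines : List (Int × List (Int × Int))) (counter : Int),
      (∀ kv ∈ lines, kv.1 < counter) → (lines.map Prod.fst).Pairwise (· < ·) →
      ((outerA f rect lines counter).map Prod.fst).Pairwise (· < ·) := by
  intro f
  induction f with
  | zero =>
    intro rect lines counter _ hp
    cases rect <;> exact hp
  | succ f ih =>
    intro rect lines counter hb hp
    cases rect with
    | nil => exact hp
    | cons hd tl =>
      obtain ⟨y, x⟩ := hd
      rw [outerA_cons]
      apply ih
      · intro kv hkv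
        rcases List.mem_append.mp hkv with h1 | h1
        · have := hb kv h1; omega
        · rw [List.mem_singleton] at h1; subst h1; exact lt_add_one _
      · rw [List.map_append, List.pairwise_append]
        refine ⟨hp, by simp, ?_⟩
        intro a ha b hbm
        simp at hbm
        subst hbm
        rcases List.mem_map.mp ha with ⟨kv, hkv, rfl⟩
        exact hb kv hkv

theorem eraseP_key (k : Int) : ∀ (l : List (Int × List (Int × Int))), (l.map Prod.fst).Nodup →
    l.eraseP (fun kv => kv.1 == k) = l.filter (fun kv => !(kv.1 == k)) := by
  intro l
  induction l with
  | nil => intro _; rfl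
  | cons kv rest ih =>
    intro hnd
    rw [List.map_cons, List.nodup_cons] at hnd
    by_cases h : kv.1 = k
    · have hbt : (kv.1 == k) = true := by simp [h]
      simp only [List.eraseP_cons, List.filter_cons, hbt, cond_true, Bool.not_true]
      rw [if_neg (by simp)]
      symm
      apply List.filter_eq_self.mpr
      intro kv' hkv'
      have hne : kv'.1 ≠ k := by
        intro he
        apply hnd.1
        have hk : kv.1 = kv'.1 := by rw [h, he]
        rw [hk]
        exact List.mem_map_of_mem hkv'
      simp [hne]
    · have hbf : (kv.1 == k) = false := by simp [h]
      simp [hbf, ih hnd.2]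

theorem fold_erase : ∀ (ks : List Int) (l : List (Int × List (Int × Int))), (l.map Prod.fst).Nodup →
    ks.foldl (fun l k => l.eraseP (fun kv => kv.1 == k)) l = l.filter (fun kv => !(ks.contains kv.1)) := by
  intro ks
  induction ks with
  | nil => intro l _; simp
  | cons k ks ih =>
    intro l hnd
    rw [List.foldl_cons, eraseP_key k l hnd]
    have hnd' : ((l.filter (fun kv => !(kv.1 == k))).map Prod.fst).Nodup :=
      ((l.filter_sublist).map Prod.fst).nodup hnd
    rw [ih _ hnd', List.filter_filter]
    apply List.filter_congr
    intro kv _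
    simp only [List.contains_cons, Bool.not_or, Bool.and_comm]

theorem checkLinesA_eq_filter (lines : List (Int × List (Int × Int)))
    (hnd : (lines.map Prod.fst).Nodup) :
    checkLinesA lines = lines.filter (fun kv => 4 ≤ kv.2.length) := by
  unfold checkLinesA
  have hconv : (fun (acc : List Int) (kv : Int × List (Int × Int)) =>
        if kv.2.length < 4 then acc ++ [kv.1] else acc)
      = fun acc kv =>
        if (fun kv : Int × List (Int × Int) => decide (kv.2.length < 4)) kv = true
        then acc ++ [(fun kv : Int × List (Int × Int) => kv.1) kv] else acc := by
    funext acc kv; by_cases h : kv.2.length < 4 <;> simp [h]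
  rw [hconv, PySem.List.foldl_append_if, List.nil_append, fold_erase _ lines hnd]
  apply List.filter_congr
  intro kv hm
  by_cases h4 : 4 ≤ kv.2.length
  · simp only [h4, decide_true]
    rw [Bool.not_eq_eq_eq_not, Bool.not_true]
    rw [← Bool.not_eq_true, List.contains_iff_mem]
    intro hmem
    rcases List.mem_map.mp hmem with ⟨kv', hkv', hfst⟩
    rcases List.mem_filter.mp hkv' with ⟨hkl, hshort⟩
    have : kv' = kv := List.inj_on_of_nodup_map hnd hkl hm hfst
    subst this
    simp at hshort
    omega
  · simp only [decide_eq_true_eq] at *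
    have h4' : kv.2.length < 4 := by omega
    have : kv.1 ∈ (List.map (fun kv : Int × List (Int × Int) => kv.1) (List.filter (fun kv => decide (kv.2.length < 4)) lines)) :=
      List.mem_map_of_mem (List.mem_filter.mpr ⟨hm, by simpa using h4'⟩)
    rw [(List.contains_iff_mem).mpr this]
    simp [h4]

-- ===== VERDICT (by name: the statement is the Claim_ definition above) =====
theorem is_rect_divided_spec : Claim_equal_is_rect_divided := by
  unfold Claim_equal_is_rect_divided
  intro rect _
  unfold Spec_is_rect_divided is_rect_divided is_rect_divided_alt
  have hkeys : ((outerA rect.length rect [] 1).map Prod.fst).Pairwise (· < ·) :=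
    outerA_keys rect.length rect [] 1 (by simp) (by simp)
  have hnd : ((outerA rect.length rect [] 1).map Prod.fst).Nodup := hkeys.imp (fun h => ne_of_lt h)
  rw [checkLinesA_eq_filter _ hnd, outerA_enum rect.length rect [] 1, List.nil_append]
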